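-- pv_equiv track=rewrite | github.com/AlibabaResearch/DAMO-ConvAI | star/LGESQL/sparc/preprocess/parse_sql/get_label_diff.py | get_label_split
-- ===== SOURCE A (Python) =====
-- STRUCT_KEYWORDS = ["WHERE", "GROUP_BY", "HAVING", "ORDER_BY", "SELECT"]
--
-- NEST_KEYWORDS = ["NONE","OP_SEL"]
--
-- UEI_KEYWORDS = ["NONE","INTERSECT","UNION","EXCEPT"]
--
-- def get_label_split(label):
--     label_split = []
--     temp = ''
--     UEI = False
--     NEST = False
--     Continue = False
--     for idx,tok in enumerate(label.split()):
--         if tok in NEST_KEYWORDS: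
--             if idx != 0:
--                 label_split.append(temp)
--                 temp = tok
--             else:
--                 temp = tok
--             NEST = True
--         elif tok in UEI_KEYWORDS:
--             if NEST:
--                 temp += ' '+tok
--                 NEST = False
--             else:
--                 if idx != 0:
--                     label_split.append(temp)
--                     temp = tok
--                 else:
--                     temp = tok
--             UEI = True
--         elif tok in STRUCT_KEYWORDS:
--             if NEST:
--                 temp += ' '+tok
--                 NEST = False
--             elif UEI:
--                 temp += ' '+tok
--                 UEI = False
--             else:
--                 if idx != 0:
--                     label_split.append(temp)
--                     temp = tok
--                     Continue = False
--                 else: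
--                     temp = tok
--         else:
--             temp += ' ' + tok
--     label_split.append(temp)
--     return label_split
-- ===== SOURCE B (Python) =====
-- STRUCT_KEYWORDS = ["WHERE", "GROUP_BY", "HAVING", "ORDER_BY", "SELECT"]
--
-- NEST_KEYWORDS = ["NONE", "OP_SEL"]
--
-- UEI_KEYWORDS = ["NONE", "INTERSECT", "UNION", "EXCEPT"]
--
--
-- def get_label_split(label):
--     toks = label.split()
--     rendered = []   # each token with the space that glues it to its segment
--     bounds = [0]    # indices where a new segment starts
--     nest = uei = False
--     for idx, tok in enumerate(toks):
--         if tok in NEST_KEYWORDS: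
--             fresh = True
--             nest = True
--         elif tok in UEI_KEYWORDS:
--             fresh = not nest
--             nest, uei = False, True
--         elif tok in STRUCT_KEYWORDS:
--             fresh = not (nest or uei)
--             if nest:
--                 nest = False
--             else:
--                 uei = False
--         else:
--             fresh = False
--         if fresh:
--             if idx != 0:
--                 bounds.append(idx)
--             rendered.append(tok)
--         else:
--             rendered.append(' ' + tok)
--     bounds.append(len(toks))
--     return [''.join(rendered[a:b]) for a, b in zip(bounds, bounds[1:])]
-- ===== Notes on version B (the rewrite author's own statement) =====
-- stated objective: alternative
-- what changed: A accumulates each segment in a growing string inside one state machine that flushes on boundaries; B first annotates every token (its rendered form with gluing space, plus the boundary indices where segments start) in one pass, then slices the rendered list at those boundaries and concatenates each slice.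
import Mathlib
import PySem

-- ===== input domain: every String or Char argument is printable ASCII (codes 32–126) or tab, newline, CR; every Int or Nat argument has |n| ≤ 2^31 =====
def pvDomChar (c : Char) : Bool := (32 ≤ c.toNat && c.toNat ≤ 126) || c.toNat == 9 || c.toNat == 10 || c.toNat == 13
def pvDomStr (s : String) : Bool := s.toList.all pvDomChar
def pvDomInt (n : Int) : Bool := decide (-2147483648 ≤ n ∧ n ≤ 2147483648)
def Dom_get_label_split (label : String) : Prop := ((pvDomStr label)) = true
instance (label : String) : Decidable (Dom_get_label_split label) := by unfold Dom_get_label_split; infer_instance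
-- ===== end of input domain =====

-- B replaces A's accumulate-and-flush state machine by an annotate-then-slice scheme: one pass
-- renders each token with its gluing space and records the segment-start indices, a second pass
-- slices the rendered list at those indices and concatenates (objective: alternative).

def pvNEST : List String := ["NONE", "OP_SEL"]
def pvUEI : List String := ["NONE", "INTERSECT", "UNION", "EXCEPT"]
def pvSTRUCT : List String := ["WHERE", "GROUP_BY", "HAVING", "ORDER_BY", "SELECT"]

-- ===== PORT A =====
-- state = (label_split, temp, UEI, NEST, Continue), exactly A's mutable variables
def pvStepA (st : List String × String × Bool × Bool × Bool) (p : Int × String) :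
    List String × String × Bool × Bool × Bool :=
  match st, p with
  | (ls, temp, uei, nest, cont), (idx, tok) =>
    if tok ∈ pvNEST then
      if idx ≠ 0 then (ls ++ [temp], tok, uei, true, cont) else (ls, tok, uei, true, cont)
    else if tok ∈ pvUEI then
      if nest then (ls, temp ++ " " ++ tok, true, false, cont)
      else if idx ≠ 0 then (ls ++ [temp], tok, true, nest, cont)
      else (ls, tok, true, nest, cont)
    else if tok ∈ pvSTRUCT then
      if nest then (ls, temp ++ " " ++ tok, uei, false, cont)
      else if uei then (ls, temp ++ " " ++ tok, false, nest, cont)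
      else if idx ≠ 0 then (ls ++ [temp], tok, uei, nest, false)
      else (ls, tok, uei, nest, cont)
    else (ls, temp ++ " " ++ tok, uei, nest, cont)

def get_label_split (label : String) : List String :=
  let fin := (PySem.List.enumerate (PySem.Str.split₀ label)).foldl pvStepA
    ([], "", false, false, false)
  fin.1 ++ [fin.2.1]

-- ===== PORT B =====
-- state = (rendered, bounds, nest, uei), exactly Source B's mutable variables
def pvStepB (st : List String × List Int × Bool × Bool) (p : Int × String) :
    List String × List Int × Bool × Bool :=
  match st, p with
  | (ren, bs, nest, uei), (idx, tok) =>
    let fnu : Bool × Bool × Bool :=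
      if tok ∈ pvNEST then (true, true, uei)
      else if tok ∈ pvUEI then (!nest, false, true)
      else if tok ∈ pvSTRUCT then
        (!(nest || uei), false, if nest then uei else false)
      else (false, nest, uei)
    if fnu.1 then
      (ren ++ [tok], (if idx ≠ 0 then bs ++ [idx] else bs), fnu.2.1, fnu.2.2)
    else
      (ren ++ [" " ++ tok], bs, fnu.2.1, fnu.2.2)

def get_label_split_alt (label : String) : List String :=
  let toks := PySem.Str.split₀ label
  let r := (PySem.List.enumerate toks).foldl pvStepB ([], [(0 : Int)], false, false)
  let bounds := r.2.1 ++ [(toks.length : Int)]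
  (bounds.zip bounds.tail).map fun ab =>
    PySem.Str.join "" (PySem.List.slice r.1 (some ab.1) (some ab.2))

-- ===== PRECONDITION & SPEC =====
def Spec_get_label_split (label : String) (out : List String) : Prop := out = get_label_split_alt label
instance (label : String) (out : List String) : Decidable (Spec_get_label_split label out) := by unfold Spec_get_label_split; infer_instance

-- ===== CLAIM (what is proved, stated in full; the proofs are below) =====
def Claim_equal_get_label_split : Prop := ∀ (label : String), Dom_get_label_split label → Spec_get_label_split label (get_label_split label)

-- ===== LEMMAS AND PROOFS =====

-- the segment strings A produces from tokens ts, given the open accumulator temp and the flags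
def pvSpec : List String → String → Bool → Bool → List String
  | [], temp, _, _ => [temp]
  | t :: ts, temp, nest, uei =>
    if t ∈ pvNEST then temp :: pvSpec ts t true uei
    else if t ∈ pvUEI then
      if nest then pvSpec ts (temp ++ " " ++ t) false true
      else temp :: pvSpec ts t nest true
    else if t ∈ pvSTRUCT then
      if nest then pvSpec ts (temp ++ " " ++ t) false uei
      else if uei then pvSpec ts (temp ++ " " ++ t) nest false
      else temp :: pvSpec ts t nest uei
    else pvSpec ts (temp ++ " " ++ t) nest uei

-- the rendered form of each token (bare if it starts a segment, else with its gluing space)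
def pvRen : List String → Bool → Bool → List String
  | [], _, _ => []
  | t :: ts, nest, uei =>
    if t ∈ pvNEST then t :: pvRen ts true uei
    else if t ∈ pvUEI then
      (if nest then " " ++ t else t) :: pvRen ts false true
    else if t ∈ pvSTRUCT then
      if nest then (" " ++ t) :: pvRen ts false uei
      else if uei then (" " ++ t) :: pvRen ts false false
      else t :: pvRen ts false false
    else (" " ++ t) :: pvRen ts nest uei

-- the boundary indices B appends while scanning ts starting at index i
def pvDel : List String → Nat → Bool → Bool → List Nat
  | [], _, _, _ => []
  | t :: ts, i, nest, uei =>
    if t ∈ pvNEST then (if i ≠ 0 then [i] else []) ++ pvDel ts (i+1) true uei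
    else if t ∈ pvUEI then
      if nest then pvDel ts (i+1) false true
      else (if i ≠ 0 then [i] else []) ++ pvDel ts (i+1) false true
    else if t ∈ pvSTRUCT then
      if nest then pvDel ts (i+1) false uei
      else if uei then pvDel ts (i+1) false false
      else (if i ≠ 0 then [i] else []) ++ pvDel ts (i+1) false false
    else pvDel ts (i+1) nest uei

-- the final flag pair of B's pass
def pvFlags : List String → Bool → Bool → Bool × Bool
  | [], nest, uei => (nest, uei)
  | t :: ts, nest, uei =>
    if t ∈ pvNEST then pvFlags ts true uei
    else if t ∈ pvUEI then pvFlags ts false true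
    else if t ∈ pvSTRUCT then
      if nest then pvFlags ts false uei else pvFlags ts false false
    else pvFlags ts nest uei

-- B's pass 2 on a boundary list
def pvSegJoin (ren : List String) : List Nat → List String
  | a :: b :: r =>
      PySem.Str.join "" ((ren.drop a).take (b - a)) :: pvSegJoin ren (b :: r)
  | _ => []

theorem pvJoin_singleton (x : String) : PySem.Str.join "" [x] = x := by
  simp [PySem.Str.join]

theorem pvCharsJoin0_snoc : ∀ (l : List (List Char)) (x : List Char),
    PySem.Chars.join [] (l ++ [x]) = PySem.Chars.join [] l ++ x
  | [], x => by simp [PySem.Chars.join, List.intercalate]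
  | [a], x => by simp [PySem.Chars.join_cons_cons, PySem.Chars.join_singleton]
  | a :: b :: r, x => by
      have ih := pvCharsJoin0_snoc (b :: r) x
      simp only [List.cons_append, PySem.Chars.join_cons_cons] at ih ⊢
      rw [ih]
      simp [List.append_assoc]

theorem pvJoin0_snoc (xs : List String) (x : String) :
    PySem.Str.join "" (xs ++ [x]) = PySem.Str.join "" xs ++ x := by
  have hchars := pvCharsJoin0_snoc (xs.map String.toList) x.toList
  have hL : (PySem.Str.join "" (xs ++ [x])).toList
      = (PySem.Str.join "" xs ++ x).toList := by
    simp only [PySem.Str.toList_join, String.toList_append, List.map_append,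
      List.map_cons, List.map_nil]
    simpa using hchars
  calc PySem.Str.join "" (xs ++ [x])
      = String.ofList ((PySem.Str.join "" (xs ++ [x])).toList) := String.ofList_toList.symm
    _ = String.ofList ((PySem.Str.join "" xs ++ x).toList) := congrArg String.ofList hL
    _ = PySem.Str.join "" xs ++ x := String.ofList_toList

theorem pvEnum_cons {α : Type} (x : α) (xs : List α) (i : Int) :
    PySem.List.enumerate (x :: xs) i = (i, x) :: PySem.List.enumerate xs (i + 1) := by
  simp [PySem.List.enumerate]

-- A's fold over indices ≥ 1 realises pvSpec
theorem pvA_eq : ∀ (ts : List String) (j : Int), 1 ≤ j →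
    ∀ (ls : List String) (temp : String) (nest uei c : Bool),
    (((PySem.List.enumerate ts j).foldl pvStepA (ls, temp, uei, nest, c)).1 ++
      [((PySem.List.enumerate ts j).foldl pvStepA (ls, temp, uei, nest, c)).2.1])
      = ls ++ pvSpec ts temp nest uei
  | [], j, hj, ls, temp, nest, uei, c => by
      simp [PySem.List.enumerate, pvSpec]
  | t :: ts, j, hj, ls, temp, nest, uei, c => by
      have hj0 : ¬ j = 0 := by omega
      rw [pvEnum_cons, List.foldl_cons]
      by_cases h1 : t ∈ pvNEST
      · have hstep : pvStepA (ls, temp, uei, nest, c) (j, t)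
            = (ls ++ [temp], t, uei, true, c) := by simp [pvStepA, h1, hj0]
        rw [hstep, pvA_eq ts (j+1) (by omega)]
        simp [pvSpec, h1]
      · by_cases h2 : t ∈ pvUEI
        · cases nest with
          | true =>
            have hstep : pvStepA (ls, temp, uei, true, c) (j, t)
                = (ls, temp ++ " " ++ t, true, false, c) := by simp [pvStepA, h1, h2]
            rw [hstep, pvA_eq ts (j+1) (by omega)]
            simp [pvSpec, h1, h2]
          | false =>
            have hstep : pvStepA (ls, temp, uei, false, c) (j, t)
                = (ls ++ [temp], t, true, false, c) := by simp [pvStepA, h1, h2, hj0]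
            rw [hstep, pvA_eq ts (j+1) (by omega)]
            simp [pvSpec, h1, h2]
        · by_cases h3 : t ∈ pvSTRUCT
          · cases nest with
            | true =>
              have hstep : pvStepA (ls, temp, uei, true, c) (j, t)
                  = (ls, temp ++ " " ++ t, uei, false, c) := by simp [pvStepA, h1, h2, h3]
              rw [hstep, pvA_eq ts (j+1) (by omega)]
              simp [pvSpec, h1, h2, h3]
            | false =>
              cases uei with
              | true =>
                have hstep : pvStepA (ls, temp, true, false, c) (j, t)
                    = (ls, temp ++ " " ++ t, false, false, c) := by simp [pvStepA, h1, h2, h3]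
                rw [hstep, pvA_eq ts (j+1) (by omega)]
                simp [pvSpec, h1, h2, h3]
              | false =>
                have hstep : pvStepA (ls, temp, false, false, c) (j, t)
                    = (ls ++ [temp], t, false, false, false) := by simp [pvStepA, h1, h2, h3, hj0]
                rw [hstep, pvA_eq ts (j+1) (by omega)]
                simp [pvSpec, h1, h2, h3]
          · have hstep : pvStepA (ls, temp, uei, nest, c) (j, t)
                = (ls, temp ++ " " ++ t, uei, nest, c) := by simp [pvStepA, h1, h2, h3]
            rw [hstep, pvA_eq ts (j+1) (by omega)]
            simp [pvSpec, h1, h2, h3]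

theorem pvRen_length : ∀ (ts : List String) (nest uei : Bool),
    (pvRen ts nest uei).length = ts.length
  | [], _, _ => rfl
  | t :: ts, nest, uei => by
      simp only [pvRen]
      split_ifs <;> simp [pvRen_length ts]

-- B's fold realises pvRen / pvDel / pvFlags
theorem pvB_fold : ∀ (ts : List String) (i : Nat) (ren : List String) (bs : List Int)
    (nest uei : Bool),
    (PySem.List.enumerate ts (i : Int)).foldl pvStepB (ren, bs, nest, uei)
      = (ren ++ pvRen ts nest uei,
         bs ++ (pvDel ts i nest uei).map (fun n : Nat => (n : Int)),
         pvFlags ts nest uei)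
  | [], i, ren, bs, nest, uei => by
      simp [PySem.List.enumerate, pvRen, pvDel, pvFlags]
  | t :: ts, i, ren, bs, nest, uei => by
      have hcast : (i : Int) + 1 = ((i + 1 : Nat) : Int) := by push_cast; ring
      have hiff : ((i : Int) ≠ 0) ↔ (i ≠ 0) := by
        constructor <;> intro h <;> omega
      rw [pvEnum_cons, List.foldl_cons]
      by_cases h1 : t ∈ pvNEST
      · have hstep : pvStepB (ren, bs, nest, uei) ((i : Int), t)
            = (ren ++ [t], (if (i : Int) ≠ 0 then bs ++ [(i : Int)] else bs), true, uei) := by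
          simp [pvStepB, h1]
        rw [hstep, hcast, pvB_fold ts (i+1)]
        by_cases hi : i = 0 <;>
          simp [pvRen, pvDel, pvFlags, h1, hi, hiff, List.append_assoc]
      · by_cases h2 : t ∈ pvUEI
        · cases nest with
          | true =>
            have hstep : pvStepB (ren, bs, true, uei) ((i : Int), t)
                = (ren ++ [" " ++ t], bs, false, true) := by simp [pvStepB, h1, h2]
            rw [hstep, hcast, pvB_fold ts (i+1)]
            simp [pvRen, pvDel, pvFlags, h1, h2]
          | false =>
            have hstep : pvStepB (ren, bs, false, uei) ((i : Int), t)
                = (ren ++ [t], (if (i : Int) ≠ 0 then bs ++ [(i : Int)] else bs),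
                    false, true) := by simp [pvStepB, h1, h2]
            rw [hstep, hcast, pvB_fold ts (i+1)]
            by_cases hi : i = 0 <;>
              simp [pvRen, pvDel, pvFlags, h1, h2, hi, hiff, List.append_assoc]
        · by_cases h3 : t ∈ pvSTRUCT
          · cases nest with
            | true =>
              have hstep : pvStepB (ren, bs, true, uei) ((i : Int), t)
                  = (ren ++ [" " ++ t], bs, false, uei) := by simp [pvStepB, h1, h2, h3]
              rw [hstep, hcast, pvB_fold ts (i+1)]
              simp [pvRen, pvDel, pvFlags, h1, h2, h3]
            | false =>
              cases uei with
              | true =>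
                have hstep : pvStepB (ren, bs, false, true) ((i : Int), t)
                    = (ren ++ [" " ++ t], bs, false, false) := by simp [pvStepB, h1, h2, h3]
                rw [hstep, hcast, pvB_fold ts (i+1)]
                simp [pvRen, pvDel, pvFlags, h1, h2, h3]
              | false =>
                have hstep : pvStepB (ren, bs, false, false) ((i : Int), t)
                    = (ren ++ [t], (if (i : Int) ≠ 0 then bs ++ [(i : Int)] else bs),
                        false, false) := by simp [pvStepB, h1, h2, h3]
                rw [hstep, hcast, pvB_fold ts (i+1)]
                by_cases hi : i = 0 <;>
                  simp [pvRen, pvDel, pvFlags, h1, h2, h3, hi, hiff, List.append_assoc]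
          · have hstep : pvStepB (ren, bs, nest, uei) ((i : Int), t)
                = (ren ++ [" " ++ t], bs, nest, uei) := by simp [pvStepB, h1, h2, h3]
            rw [hstep, hcast, pvB_fold ts (i+1)]
            simp [pvRen, pvDel, pvFlags, h1, h2, h3]

-- facts extracted from 'the rendered list from index i on starts with r₀'
theorem pvTakeExt (ren : List String) (a i : Nat) (r₀ : String) (rest : List String)
    (h : ren.drop i = r₀ :: rest) (ha : a ≤ i) :
    (ren.drop a).take (i + 1 - a) = (ren.drop a).take (i - a) ++ [r₀] := by
  have hdd : (ren.drop a).drop (i - a) = ren.drop i := by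
    rw [List.drop_drop]
    congr 1
    omega
  rw [show i + 1 - a = i - a + 1 by omega, List.take_add, hdd, h]
  rfl

theorem pvB_spec (ren : List String) : ∀ (ts : List String) (i a : Nat) (nest uei : Bool),
    ren.drop i = pvRen ts nest uei → a < i →
    pvSegJoin ren (a :: (pvDel ts i nest uei ++ [ren.length]))
      = pvSpec ts (PySem.Str.join "" ((ren.drop a).take (i - a))) nest uei
  | [], i, a, nest, uei, hdrop, ha => by
      have hlen : ren.length ≤ i := by
        by_contra hc
        have : ren.drop i ≠ [] := by
          apply List.ne_nil_of_length_pos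
          simp [List.length_drop]; omega
        exact this (by simpa [pvRen] using hdrop)
      have h1 : (ren.drop a).take (ren.length - a) = ren.drop a :=
        List.take_of_length_le (by simp [List.length_drop])
      have h2 : (ren.drop a).take (i - a) = ren.drop a :=
        List.take_of_length_le (by simp [List.length_drop]; omega)
      simp [pvDel, pvSegJoin, pvSpec, h1, h2]
  | t :: ts, i, a, nest, uei, hdrop, ha => by
      have hi0 : i ≠ 0 := by omega
      -- generic continuation once the head r₀ and the new flags are known
      have main : ∀ (r₀ : String) (n' u' : Bool), ren.drop i = r₀ :: pvRen ts n' u' →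
          (pvSegJoin ren (a :: (pvDel ts (i+1) n' u' ++ [ren.length]))
              = pvSpec ts (PySem.Str.join "" ((ren.drop a).take (i - a)) ++ r₀) n' u')
          ∧ (pvSegJoin ren (a :: i :: (pvDel ts (i+1) n' u' ++ [ren.length]))
              = PySem.Str.join "" ((ren.drop a).take (i - a)) :: pvSpec ts r₀ n' u') := by
        intro r₀ n' u' hd
        have hdrop1 : ren.drop (i+1) = pvRen ts n' u' := by
          have h := List.drop_drop (i := 1) (j := i) (l := ren)
          rw [hd] at h
          simpa using h.symm
        have hext := pvTakeExt ren a i r₀ (pvRen ts n' u') hd (by omega)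
        have hglue : PySem.Str.join "" ((ren.drop a).take (i + 1 - a))
            = PySem.Str.join "" ((ren.drop a).take (i - a)) ++ r₀ := by
          rw [hext, pvJoin0_snoc]
        have htake1 : (ren.drop i).take 1 = [r₀] := by rw [hd]; rfl
        constructor
        · rw [pvB_spec ren ts (i+1) a n' u' hdrop1 (by omega), hglue]
        · have hrec := pvB_spec ren ts (i+1) i n' u' hdrop1 (by omega)
          rw [show i + 1 - i = 1 by omega, htake1, pvJoin_singleton] at hrec
          simp only [pvSegJoin]
          rw [hrec]
      by_cases h1 : t ∈ pvNEST
      · simp only [pvRen, h1, if_pos] at hdrop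
        simp only [pvDel, pvSpec, h1, if_pos, hi0, ite_true, ne_eq,
          not_false_eq_true, List.cons_append, List.singleton_append]
        exact (main t true uei hdrop).2
      · by_cases h2 : t ∈ pvUEI
        · cases nest with
          | true =>
            simp only [pvRen, h1, h2, ite_true, ite_false] at hdrop
            simp only [pvDel, pvSpec, h1, h2, ite_true, ite_false]
            have hm := (main (" " ++ t) false true hdrop).1
            rwa [← String.append_assoc] at hm
          | false =>
            simp only [pvRen, h1, h2, ite_true, ite_false, Bool.false_eq_true] at hdrop
            simp only [pvDel, pvSpec, h1, h2, hi0, ite_true, ite_false, ne_eq,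
              not_false_eq_true, Bool.false_eq_true, List.cons_append, List.singleton_append]
            exact (main t false true hdrop).2
        · by_cases h3 : t ∈ pvSTRUCT
          · cases nest with
            | true =>
              simp only [pvRen, h1, h2, h3, ite_true, ite_false] at hdrop
              simp only [pvDel, pvSpec, h1, h2, h3, ite_true, ite_false]
              have hm := (main (" " ++ t) false uei hdrop).1
              rwa [← String.append_assoc] at hm
            | false =>
              cases uei with
              | true =>
                simp only [pvRen, h1, h2, h3, ite_true, ite_false,
                  Bool.false_eq_true] at hdrop
                simp only [pvDel, pvSpec, h1, h2, h3, ite_true, ite_false,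
                  Bool.false_eq_true]
                have hm := (main (" " ++ t) false false hdrop).1
                rwa [← String.append_assoc] at hm
              | false =>
                simp only [pvRen, h1, h2, h3, ite_true, ite_false,
                  Bool.false_eq_true] at hdrop
                simp only [pvDel, pvSpec, h1, h2, h3, hi0, ite_true, ite_false, ne_eq,
                  not_false_eq_true, Bool.false_eq_true, List.cons_append,
                  List.singleton_append]
                exact (main t false false hdrop).2
          · simp only [pvRen, h1, h2, h3, ite_false] at hdrop
            simp only [pvDel, pvSpec, h1, h2, h3, ite_false]
            have hm := (main (" " ++ t) nest uei hdrop).1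
            rwa [← String.append_assoc] at hm

-- the zip-with-tail comprehension of B is pvSegJoin
theorem pvZip_eq (ren : List String) : ∀ (bs : List Nat) (a : Nat),
    ((((a :: bs).map (fun n : Nat => (n : Int))).zip
        (((a :: bs).map (fun n : Nat => (n : Int))).tail)).map fun ab =>
      PySem.Str.join "" (PySem.List.slice ren (some ab.1) (some ab.2)))
      = pvSegJoin ren (a :: bs)
  | [], a => by simp [pvSegJoin]
  | b :: bs, a => by
      have ih := pvZip_eq ren bs b
      simp only [List.map_cons, List.tail_cons, List.zip_cons_cons] at ih ⊢
      rw [ih]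
      simp [pvSegJoin, PySem.List.slice_natCast]

-- ===== VERDICT (by name: the statement is the Claim_ definition above) =====
theorem get_label_split_spec : Claim_equal_get_label_split := by
  intro label _
  unfold Spec_get_label_split get_label_split get_label_split_alt
  cases htoks : PySem.Str.split₀ label with
  | nil =>
      simp [PySem.List.enumerate, PySem.List.slice, PySem.Str.join, PySem.Chars.join, List.intercalate]
  | cons t rest =>
      simp only [pvEnum_cons, List.foldl_cons]
      rw [show ((0 : Int) + 1) = ((1 : Nat) : Int) by norm_num]
      -- generic finish once A's first step (temp₀, flags) and B's first rendered token agree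
      have main : ∀ (r₀ : String) (n' u' : Bool),
          let ren := r₀ :: pvRen rest n' u'
          (ls : List String) → ls = pvSpec rest r₀ n' u' →
          ls =
            (((((0 : Int) :: (pvDel rest 1 n' u').map (fun n : Nat => (n : Int))) ++
                [((t :: rest).length : Int)]).zip
              ((((0 : Int) :: (pvDel rest 1 n' u').map (fun n : Nat => (n : Int))) ++
                [((t :: rest).length : Int)]).tail)).map fun ab =>
              PySem.Str.join "" (PySem.List.slice ren (some ab.1) (some ab.2))) := by
        intro r₀ n' u' ren ls hls
        have hlen : (t :: rest).length = ren.length := by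
          simp [ren, pvRen_length]
        have hmap : (((0 : Int) :: (pvDel rest 1 n' u').map (fun n : Nat => (n : Int))) ++
              [((t :: rest).length : Int)])
            = ((0 :: (pvDel rest 1 n' u' ++ [ren.length])).map (fun n : Nat => (n : Int))) := by
          simp [hlen]
        rw [hmap, pvZip_eq ren (pvDel rest 1 n' u' ++ [ren.length]) 0,
          pvB_spec ren rest 1 0 n' u' (by simp [ren]) (by omega)]
        have h1 : (ren.drop 0).take (1 - 0) = [r₀] := by simp [ren]
        rw [h1, pvJoin_singleton]
        exact hls
      by_cases h1 : t ∈ pvNEST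
      · have hsA : pvStepA ([], "", false, false, false) ((0 : Int), t)
            = ([], t, false, true, false) := by simp [pvStepA, h1]
        have hsB : pvStepB ([], [(0 : Int)], false, false) ((0 : Int), t)
            = ([t], [(0 : Int)], true, false) := by simp [pvStepB, h1]
        rw [hsA, hsB, pvB_fold rest 1 [t] [(0 : Int)] true false]
        simp only [List.singleton_append, List.cons_append, List.nil_append]
        exact main t true false _ (pvA_eq rest ((1 : Nat) : Int) (by norm_num) [] t true false false)
      · by_cases h2 : t ∈ pvUEI
        · have hsA : pvStepA ([], "", false, false, false) ((0 : Int), t)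
              = ([], t, true, false, false) := by simp [pvStepA, h1, h2]
          have hsB : pvStepB ([], [(0 : Int)], false, false) ((0 : Int), t)
              = ([t], [(0 : Int)], false, true) := by simp [pvStepB, h1, h2]
          rw [hsA, hsB, pvB_fold rest 1 [t] [(0 : Int)] false true]
          simp only [List.singleton_append, List.cons_append, List.nil_append]
          exact main t false true _ (pvA_eq rest ((1 : Nat) : Int) (by norm_num) [] t false true false)
        · by_cases h3 : t ∈ pvSTRUCT
          · have hsA : pvStepA ([], "", false, false, false) ((0 : Int), t)
                = ([], t, false, false, false) := by simp [pvStepA, h1, h2, h3]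
            have hsB : pvStepB ([], [(0 : Int)], false, false) ((0 : Int), t)
                = ([t], [(0 : Int)], false, false) := by simp [pvStepB, h1, h2, h3]
            rw [hsA, hsB, pvB_fold rest 1 [t] [(0 : Int)] false false]
            simp only [List.singleton_append, List.cons_append, List.nil_append]
            exact main t false false _ (pvA_eq rest ((1 : Nat) : Int) (by norm_num) [] t false false false)
          · have hsA : pvStepA ([], "", false, false, false) ((0 : Int), t)
                = ([], "" ++ " " ++ t, false, false, false) := by simp [pvStepA, h1, h2, h3]
            have hsB : pvStepB ([], [(0 : Int)], false, false) ((0 : Int), t)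
                = ([" " ++ t], [(0 : Int)], false, false) := by simp [pvStepB, h1, h2, h3]
            have hempty : ("" ++ " " ++ t : String) = " " ++ t := by
              simp
            rw [hsA, hsB, pvB_fold rest 1 [" " ++ t] [(0 : Int)] false false]
            simp only [List.singleton_append, List.cons_append, List.nil_append]
            refine main (" " ++ t) false false _ ?_
            rw [← hempty]
            exact pvA_eq rest ((1 : Nat) : Int) (by norm_num) [] ("" ++ " " ++ t) false false false
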